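-- pv_equiv track=rewrite | github.com/taofineberg/netbox-helper | export_netbox_config.py | _section_from_identifier
-- ===== SOURCE A (Python) =====
-- def _section_from_identifier(identifier: str) -> str:
--     ident = str(identifier or "").strip()
--     if not ident:
--         return ""
--     base = ident[:-2] if ident.endswith("-h") else ident
--     labels = [
--         "ip-addresses",
--         "power-panels",
--         "power-feeds",
--         "powercables",
--         "prefixroles",
--         "locations",
--         "devices",
--         "modules",
--         "cables",
--         "prefix",
--         "sites",
--         "racks",
--         "vrf",
--     ]
--     for label in labels:
--         if base.endswith(label):
--             return label
--     return ""
-- ===== SOURCE B (Python) =====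
-- def _section_from_identifier(identifier: str) -> str:
--     ident = str(identifier or "").strip()
--     if not ident:
--         return ""
--     base = ident[:-2] if ident.endswith("-h") else ident
--     labels = [
--         "ip-addresses",
--         "power-panels",
--         "power-feeds",
--         "powercables",
--         "prefixroles",
--         "locations",
--         "devices",
--         "modules",
--         "cables",
--         "prefix",
--         "sites",
--         "racks",
--         "vrf",
--     ]
--     matches = [label for label in labels if base.endswith(label)]
--     return max(matches, key=len, default="")
-- ===== Notes on version B (the rewrite author's own statement) =====
-- stated objective: alternative
-- what changed: B replaces A's short-circuiting first-match scan over the label list with a collect-all-matching-suffixes comprehension followed by selecting the longest match (max with key=len, default ""); this is equivalent because the label list is ordered by non-increasing length and no two distinct equal-length labels can both be suffixes of the same string.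
import Mathlib
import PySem

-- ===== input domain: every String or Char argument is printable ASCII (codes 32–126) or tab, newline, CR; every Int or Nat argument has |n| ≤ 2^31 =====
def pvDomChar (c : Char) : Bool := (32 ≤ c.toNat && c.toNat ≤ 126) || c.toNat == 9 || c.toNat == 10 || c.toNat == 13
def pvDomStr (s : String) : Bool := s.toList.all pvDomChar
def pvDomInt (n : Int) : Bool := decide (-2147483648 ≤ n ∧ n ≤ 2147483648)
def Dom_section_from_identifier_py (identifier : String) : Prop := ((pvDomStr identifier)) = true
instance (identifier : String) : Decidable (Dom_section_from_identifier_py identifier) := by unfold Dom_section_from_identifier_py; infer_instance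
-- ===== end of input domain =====

-- B replaces A's first-match scan over the labels with collect-all-suffix-matches then pick the
-- longest (objective: alternative decomposition; equivalent since labels are in non-increasing
-- length order and equal-length distinct labels cannot both be suffixes of one string).

-- ===== PORT A =====
def pvLabels : List String :=
  ["ip-addresses", "power-panels", "power-feeds", "powercables", "prefixroles",
   "locations", "devices", "modules", "cables", "prefix", "sites", "racks", "vrf"]

-- A's `for label in labels: if base.endswith(label): return label` / `return ""` loop
def pvScanA (base : String) : List String → String
  | [] => ""
  | l :: rest => if PySem.Str.endswith base l then l else pvScanA base rest

def section_from_identifier_py (identifier : String) : String :=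
  -- `str(identifier or "").strip()`: for a str argument, `identifier or ""` is `identifier`
  -- (falsy str is exactly ""), so this is `identifier.strip()`
  let ident := PySem.Str.strip identifier
  if ident = "" then ""
  else
    let base := if PySem.Str.endswith ident "-h" then PySem.Str.slice ident none (some (-2)) else ident
    pvScanA base pvLabels

-- ===== PORT B =====
def section_from_identifier_py_alt (identifier : String) : String :=
  let ident := PySem.Str.strip identifier
  if ident = "" then ""
  else
    let base := if PySem.Str.endswith ident "-h" then PySem.Str.slice ident none (some (-2)) else ident
    let hits := pvLabels.filter (fun label => PySem.Str.endswith base label)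
    PySem.List.maxD hits PySem.Str.len ""

-- ===== PRECONDITION & SPEC =====
def Spec_section_from_identifier_py (identifier : String) (out : String) : Prop := out = section_from_identifier_py_alt identifier
instance (identifier : String) (out : String) : Decidable (Spec_section_from_identifier_py identifier out) := by unfold Spec_section_from_identifier_py; infer_instance

-- ===== CLAIM (what is proved, stated in full; the proofs are below) =====
def Claim_equal_section_from_identifier_py : Prop := ∀ (identifier : String), Dom_section_from_identifier_py identifier → Spec_section_from_identifier_py identifier (section_from_identifier_py identifier)

-- ===== LEMMAS AND PROOFS =====

-- Python's max keeps the first element on key ties; if the head's key dominates the tail,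
-- the fold inside max? never replaces it.
theorem pv_max?_cons_of_le (key : String → Int) (x : String) (t : List String)
    (h : ∀ y ∈ t, key y ≤ key x) :
    PySem.List.max? (x :: t) key = some x := by
  induction t with
  | nil => rfl
  | cons y t ih =>
    have step : PySem.List.max? (x :: y :: t) key = PySem.List.max? (x :: t) key := by
      simp [PySem.List.max?, List.foldl_cons, not_lt.mpr (h y List.mem_cons_self)]
    rw [step]
    exact ih (fun z hz => h z (List.mem_cons_of_mem _ hz))

-- On a list whose lengths are non-increasing, longest-match-of-all-matches = first match.
theorem pv_maxD_filter_eq_scan (base : String) (L : List String)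
    (hL : L.Pairwise (fun a b => PySem.Str.len b ≤ PySem.Str.len a)) :
    PySem.List.maxD (L.filter (fun label => PySem.Str.endswith base label)) PySem.Str.len ""
      = pvScanA base L := by
  induction L with
  | nil => rfl
  | cons l rest ih =>
    rcases List.pairwise_cons.mp hL with ⟨h1, h2⟩
    by_cases hmatch : PySem.Str.endswith base l
    · have hdom : ∀ y ∈ rest.filter (fun label => PySem.Str.endswith base label),
          PySem.Str.len y ≤ PySem.Str.len l :=
        fun y hy => h1 y (List.mem_of_mem_filter hy)
      rw [List.filter_cons, if_pos hmatch]
      unfold PySem.List.maxD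
      rw [pv_max?_cons_of_le PySem.Str.len l _ hdom, Option.getD_some, pvScanA, if_pos hmatch]
    · rw [List.filter_cons, if_neg hmatch, pvScanA, if_neg hmatch]
      exact ih h2

theorem pvLabels_lengths_nonincreasing :
    pvLabels.Pairwise (fun a b => PySem.Str.len b ≤ PySem.Str.len a) := by
  decide

-- ===== VERDICT (by name: the statement is the Claim_ definition above) =====
theorem section_from_identifier_py_spec : Claim_equal_section_from_identifier_py := by
  intro identifier _
  unfold Spec_section_from_identifier_py section_from_identifier_py section_from_identifier_py_alt
  by_cases hempty : PySem.Str.strip identifier = ""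
  · rw [if_pos hempty, if_pos hempty]
  · rw [if_neg hempty, if_neg hempty]
    exact (pv_maxD_filter_eq_scan _ _ pvLabels_lengths_nonincreasing).symm
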